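-- pv_equiv track=rewrite | github.com/iban-borras/informational-singularity-hypothesis | level0/hybrid_collapse_engine.py | _find_safe_cut_point
-- ===== SOURCE A (Python) =====
-- def _find_safe_cut_point(data: str, max_pos: int) -> int:
--     """
--     Find the last position <= max_pos where parenthesis depth is 0.
--
--     Scans backwards from max_pos to find a safe cut point.
--
--     Args:
--         data: The string to analyze
--         max_pos: Maximum position to consider
--
--     Returns:
--         Safe cut position (depth 0), or 0 if not found
--     """
--     # Scan forward to build depth at each position
--     # Then find last position with depth 0 before max_pos
--     depth = 0
--     last_zero_depth = 0
--
--     for i, char in enumerate(data):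
--         if i > max_pos:
--             break
--         if char == '(':
--             depth += 1
--         elif char == ')':
--             depth -= 1
--
--         if depth == 0:
--             last_zero_depth = i + 1  # Position AFTER this char
--
--     return last_zero_depth
-- ===== SOURCE B (Python) =====
-- def _find_safe_cut_point(data: str, max_pos: int) -> int:
--     """Build a prefix-depth table for data[:max_pos+1], then scan it from the
--     end for the last position with depth 0; 0 if none."""
--     n = min(len(data), max_pos + 1) if max_pos >= 0 else 0
--     depths = []
--     d = 0
--     for c in data[:n]:
--         if c == '(':
--             d += 1
--         elif c == ')':
--             d -= 1
--         depths.append(d)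
--     for i in range(len(depths) - 1, -1, -1):
--         if depths[i] == 0:
--             return i + 1
--     return 0
-- ===== Notes on version B (the rewrite author's own statement) =====
-- stated objective: alternative
-- what changed: Replaced the single forward scan that records the last zero-depth position on the fly with a two-phase decomposition: build a prefix-depth table for data[:max_pos+1], then search the table backwards for the last zero.
import Mathlib
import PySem

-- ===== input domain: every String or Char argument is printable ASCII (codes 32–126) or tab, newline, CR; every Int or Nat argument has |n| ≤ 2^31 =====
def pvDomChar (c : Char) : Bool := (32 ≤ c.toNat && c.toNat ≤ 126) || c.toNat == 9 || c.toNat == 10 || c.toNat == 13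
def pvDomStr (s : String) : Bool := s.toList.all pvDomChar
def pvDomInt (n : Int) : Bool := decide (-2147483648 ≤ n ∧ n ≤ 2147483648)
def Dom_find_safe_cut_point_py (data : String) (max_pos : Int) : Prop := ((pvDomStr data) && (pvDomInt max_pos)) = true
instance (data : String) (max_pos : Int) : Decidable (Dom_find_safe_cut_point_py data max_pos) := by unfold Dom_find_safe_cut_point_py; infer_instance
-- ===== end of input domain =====

-- B replaces A's single recording forward scan by prefix-depth-table building plus a backward search (alternative decomposition, same cost).

-- ===== PORT A =====
-- the for-loop over enumerate(data) with its break, carrying (depth, last_zero_depth)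
def fscpA (max_pos : Int) : List (Int × Char) → Int → Int → Int
  | [], _, last => last
  | (i, c) :: rest, depth, last =>
    if i > max_pos then last
    else
      let d := if c = '(' then depth + 1 else if c = ')' then depth - 1 else depth
      fscpA max_pos rest d (if d = 0 then i + 1 else last)

def find_safe_cut_point_py (data : String) (max_pos : Int) : Int :=
  fscpA max_pos (PySem.List.enumerate data.toList 0) 0 0

-- ===== PORT B =====
-- first loop of Source B: cumulative depth after each char
def fscpDepths : List Char → Int → List Int
  | [], _ => []
  | c :: rest, d =>
    let d' := if c = '(' then d + 1 else if c = ')' then d - 1 else d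
    d' :: fscpDepths rest d'
-- second loop of Source B: 'for i in range(len-1,-1,-1): if depths[i]==0: return i+1' / 'return 0',
-- transliterated over the reversed table with k the current index+1
def fscpBack : List Int → Int → Int
  | [], _ => 0
  | d :: rest, k => if d = 0 then k else fscpBack rest (k - 1)

def find_safe_cut_point_py_alt (data : String) (max_pos : Int) : Int :=
  let n : Int := if max_pos ≥ 0 then min (data.toList.length : Int) (max_pos + 1) else 0
  -- data[:n] with 0 ≤ n: PySem slice, exact
  let pref := PySem.List.slice data.toList none (some n)
  let ds := fscpDepths pref 0
  fscpBack ds.reverse (ds.length : Int)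

-- ===== PRECONDITION & SPEC =====
def Spec_find_safe_cut_point_py (data : String) (max_pos : Int) (out : Int) : Prop := out = find_safe_cut_point_py_alt data max_pos
instance (data : String) (max_pos : Int) (out : Int) : Decidable (Spec_find_safe_cut_point_py data max_pos out) := by unfold Spec_find_safe_cut_point_py; infer_instance

-- ===== CLAIM (what is proved, stated in full; the proofs are below) =====
def Claim_equal_find_safe_cut_point_py : Prop := ∀ (data : String) (max_pos : Int), Dom_find_safe_cut_point_py data max_pos → Spec_find_safe_cut_point_py data max_pos (find_safe_cut_point_py data max_pos)

-- ===== LEMMAS AND PROOFS =====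

-- A's loop without the break, over an already-truncated char list
def fscpLoop : List Char → Int → Int → Int → Int
  | [], _, _, l => l
  | c :: rest, i, d, l =>
    let d' := if c = '(' then d + 1 else if c = ')' then d - 1 else d
    fscpLoop rest (i + 1) d' (if d' = 0 then i + 1 else l)

-- fscpBack with an explicit fallback value
def fscpBackF : List Int → Int → Int → Int
  | [], _, l => l
  | d :: rest, k, l => if d = 0 then k else fscpBackF rest (k - 1) l

theorem fscpBack_eq_F (xs : List Int) (k : Int) : fscpBack xs k = fscpBackF xs k 0 := by
  induction xs generalizing k with
  | nil => rfl
  | cons d rest ih => simp [fscpBack, fscpBackF, ih]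

theorem fscpDepths_length (ys : List Char) (d : Int) : (fscpDepths ys d).length = ys.length := by
  induction ys generalizing d with
  | nil => rfl
  | cons c rest ih => simp [fscpDepths, ih]

theorem fscpBackF_append (xs : List Int) (a k l : Int) :
    fscpBackF (xs ++ [a]) k l = fscpBackF xs k (if a = 0 then k - xs.length else l) := by
  induction xs generalizing k with
  | nil => simp [fscpBackF]
  | cons d rest ih =>
    simp only [List.cons_append, fscpBackF, ih, List.length_cons]
    have : k - 1 - (rest.length : Int) = k - ((rest.length : Int) + 1) := by ring
    rw [this]
    push_cast
    ring_nf

theorem fscpA_eq_loop (mp : Int) (xs : List Char) (j d l : Int) :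
    fscpA mp (PySem.List.enumerate xs j) d l = fscpLoop (xs.take (mp + 1 - j).toNat) j d l := by
  induction xs generalizing j d l with
  | nil => simp [PySem.List.enumerate_nil, fscpA, fscpLoop]
  | cons c rest ih =>
    rw [PySem.List.enumerate_cons]
    by_cases h : j > mp
    · have h0 : (mp + 1 - j).toNat = 0 := by omega
      simp [fscpA, h, h0, fscpLoop]
    · have h1 : (mp + 1 - j).toNat = (mp + 1 - (j + 1)).toNat + 1 := by omega
      rw [h1]
      simp only [fscpA, if_neg h, List.take_succ_cons, fscpLoop]
      exact ih (j + 1) _ _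

theorem fscpLoop_eq_back (ys : List Char) (j d l : Int) :
    fscpLoop ys j d l = fscpBackF (fscpDepths ys d).reverse (j + ys.length) l := by
  induction ys generalizing j d l with
  | nil => simp [fscpLoop, fscpDepths, fscpBackF]
  | cons c rest ih =>
    simp only [fscpLoop, fscpDepths, List.reverse_cons, List.length_cons]
    rw [fscpBackF_append, ih]
    have hlen : ((fscpDepths rest (if c = '(' then d + 1 else if c = ')' then d - 1 else d)).reverse.length : Int)
        = (rest.length : Int) := by
      rw [List.length_reverse, fscpDepths_length]
    rw [hlen]
    have h1 : j + ((rest.length : Int) + 1) - (rest.length : Int) = j + 1 := by ring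
    have h2 : j + ((rest.length : Int) + 1) = (j + 1) + (rest.length : Int) := by ring
    push_cast
    rw [h1, h2]

theorem take_min_len (xs : List Char) (t : Nat) : xs.take (min xs.length t) = xs.take t := by
  by_cases h : t ≤ xs.length
  · rw [Nat.min_eq_right h]
  · rw [Nat.min_eq_left (by omega), List.take_length, List.take_of_length_le (by omega)]

-- ===== VERDICT (by name: the statement is the Claim_ definition above) =====
theorem find_safe_cut_point_py_spec : Claim_equal_find_safe_cut_point_py := by
  intro data mp _
  simp only [Spec_find_safe_cut_point_py, find_safe_cut_point_py, find_safe_cut_point_py_alt]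
  generalize data.toList = xs
  by_cases h : mp ≥ 0
  · have hn : (0:Int) ≤ min (xs.length : Int) (mp + 1) := by omega
    rw [if_pos h, PySem.List.slice_to _ hn]
    have htn : (min (xs.length : Int) (mp + 1)).toNat = min xs.length (mp + 1).toNat := by omega
    rw [htn, take_min_len]
    rw [fscpA_eq_loop, fscpLoop_eq_back]
    rw [fscpBack_eq_F, fscpDepths_length]
    have : mp + 1 - 0 = mp + 1 := by ring
    rw [this]
    ring_nf
  · rw [if_neg h, PySem.List.slice_to _ (le_refl 0)]
    have h0 : ((0:Int)).toNat = 0 := rfl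
    have h1 : (mp + 1 - 0).toNat = 0 := by omega
    rw [fscpA_eq_loop, h1, h0]
    simp [fscpLoop, fscpDepths, fscpBack]
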